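-- pv_equiv track=rewrite | github.com/Gjiha/Universita | Primo_anno/Programmazione/programi vscode/programmi_python/esercizi/Morgan.py | trova_nomi
-- ===== SOURCE A (Python) =====
-- def trova_nomi(x):
--     l = "Mario; Giovanni; Elena; Pina; Gino; Rino; Umberto"
--     y = l.split('; ')
--     d={}
--     p = 0
--
--     for c in y:
--         a = d.get(c,[])
--         a.append(0)
--
--         d[c] = a
--
--     for t in x.split('; '):
--         if t in d:
--             p += 1
--         else:
--             continue
--
--     return p
-- ===== SOURCE B (Python) =====
-- def trova_nomi(x):
--     freq = {}
--     for t in x.split('; '):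
--         freq[t] = freq.get(t, 0) + 1
--     return sum(freq.get(name, 0)
--                for name in ("Mario", "Giovanni", "Elena", "Pina", "Gino", "Rino", "Umberto"))
-- ===== Notes on version B (the rewrite author's own statement) =====
-- stated objective: alternative
-- what changed: Instead of testing each input token for membership in a dict keyed by the seven names, B builds a frequency table of the input tokens once and then loops over the seven fixed names, summing each name's count.
import Mathlib
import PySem

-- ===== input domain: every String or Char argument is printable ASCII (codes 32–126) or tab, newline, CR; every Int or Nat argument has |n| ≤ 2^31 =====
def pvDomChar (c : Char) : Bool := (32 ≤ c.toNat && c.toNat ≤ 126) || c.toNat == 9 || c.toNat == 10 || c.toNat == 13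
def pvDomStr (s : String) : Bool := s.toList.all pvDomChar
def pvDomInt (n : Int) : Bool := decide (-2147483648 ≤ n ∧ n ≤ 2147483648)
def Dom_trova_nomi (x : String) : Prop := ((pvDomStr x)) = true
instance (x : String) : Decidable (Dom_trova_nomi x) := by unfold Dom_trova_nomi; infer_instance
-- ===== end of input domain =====

-- B inverts the traversal: a frequency table of the input tokens is built once and the
-- seven fixed names are summed against it, instead of testing every input token for membership.

-- s.split('; ') with the nonempty literal separator (split? is none only for sep = "")
def pvSplit (s : String) : List String := (PySem.Str.split? s "; ").getD []

-- ===== PORT A =====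
def trova_nomi (x : String) : Int :=
  let y := pvSplit "Mario; Giovanni; Elena; Pina; Gino; Rino; Umberto"
  let d := y.foldl (fun d c => d.insert c ((d.getD c []) ++ [(0 : Int)]))
             (PySem.Dict.empty : PySem.Dict String (List Int))
  (pvSplit x).foldl (fun p t => if d.contains t then p + 1 else p) 0

-- ===== PORT B =====
def pvNames : List String := ["Mario", "Giovanni", "Elena", "Pina", "Gino", "Rino", "Umberto"]

def trova_nomi_alt (x : String) : Int :=
  let freq := (pvSplit x).foldl
    (fun f t => f.insert t (f.getD t 0 + 1)) (PySem.Dict.empty : PySem.Dict String Int)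
  pvNames.foldl (fun acc n => acc + freq.getD n 0) 0

-- ===== PRECONDITION & SPEC =====
def Spec_trova_nomi (x : String) (out : Int) : Prop := out = trova_nomi_alt x
instance (x : String) (out : Int) : Decidable (Spec_trova_nomi x out) := by unfold Spec_trova_nomi; infer_instance

-- ===== CLAIM (what is proved, stated in full; the proofs are below) =====
def Claim_equal_trova_nomi : Prop := ∀ (x : String), Dom_trova_nomi x → Spec_trova_nomi x (trova_nomi x)

-- ===== LEMMAS AND PROOFS =====

-- A's dict d (built from the constant string) answers membership in pvNames
lemma pvContains_eq (t : String) :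
    ((pvSplit "Mario; Giovanni; Elena; Pina; Gino; Rino; Umberto").foldl
      (fun d c => d.insert c ((d.getD c []) ++ [(0 : Int)]))
      (PySem.Dict.empty : PySem.Dict String (List Int))).contains t
    = decide (t ∈ pvNames) := by
  have hd : (pvSplit "Mario; Giovanni; Elena; Pina; Gino; Rino; Umberto").foldl
      (fun d c => d.insert c ((d.getD c []) ++ [(0 : Int)]))
      (PySem.Dict.empty : PySem.Dict String (List Int))
    = PySem.Dict.mk [("Mario",[0]),("Giovanni",[0]),("Elena",[0]),("Pina",[0]),
        ("Gino",[0]),("Rino",[0]),("Umberto",[0])] := by decide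
  rw [hd]
  simp [PySem.Dict.contains_mk, pvNames, List.mem_cons, beq_eq_decide, eq_comm]

-- summing a 0/1 indicator over a duplicate-free list is a membership test
lemma pvIndicator (ns : List String) (hnd : ns.Nodup) (t : String) :
    (ns.map (fun n => if n = t then (1 : Int) else 0)).sum
    = if t ∈ ns then 1 else 0 := by
  induction ns with
  | nil => simp
  | cons n ns ih =>
    simp only [List.nodup_cons] at hnd
    obtain ⟨hn, hnd⟩ := hnd
    by_cases h : n = t
    · subst h
      have hz : (ns.map (fun m => if m = n then (1 : Int) else 0)).sum = 0 := by
        rw [List.sum_eq_zero]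
        intro v hv
        simp only [List.mem_map] at hv
        obtain ⟨m, hm, rfl⟩ := hv
        simp [show ¬ m = n from fun e => hn (e ▸ hm)]
      simp [List.sum_cons, hz]
    · rw [List.map_cons, List.sum_cons, if_neg h, ih hnd, zero_add,
        if_congr (Iff.intro
          (fun hm => (List.mem_cons.mp hm).resolve_left (fun e => h e.symm))
          (List.mem_cons_of_mem n)) rfl rfl]

-- counting the tokens that are known names equals summing per-name counts
lemma pvMain (toks : List String) :
    (toks.countP (fun t => decide (t ∈ pvNames)) : Int)
    = (pvNames.map (fun n => (toks.count n : Int))).sum := by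
  induction toks with
  | nil => simp
  | cons t toks ih =>
    rw [List.countP_cons]
    have hcnt : pvNames.map (fun n => ((t :: toks).count n : Int))
        = pvNames.map (fun n => (toks.count n : Int) + (if n = t then 1 else 0)) := by
      apply List.map_congr_left
      intro n _
      by_cases h : n = t
      · simp [h]
      · simp [h, show ¬ t = n from fun e => h e.symm]
    rw [hcnt]
    have hsum : (pvNames.map (fun n => (toks.count n : Int) + (if n = t then 1 else 0))).sum
        = (pvNames.map (fun n => (toks.count n : Int))).sum
          + (pvNames.map (fun n => if n = t then (1 : Int) else 0)).sum := by
      simp [← List.sum_map_add]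
    rw [hsum, pvIndicator pvNames (by decide) t, ← ih]
    by_cases h : t ∈ pvNames <;> simp [h]

theorem trova_nomi_spec : Claim_equal_trova_nomi := by
  intro x _
  show trova_nomi x = trova_nomi_alt x
  have hA : trova_nomi x = ((pvSplit x).countP (fun t => decide (t ∈ pvNames)) : Int) := by
    simp only [trova_nomi]
    rw [show (fun (p : Int) (t : String) =>
          if ((pvSplit "Mario; Giovanni; Elena; Pina; Gino; Rino; Umberto").foldl
              (fun d c => d.insert c ((d.getD c []) ++ [(0 : Int)]))
              (PySem.Dict.empty : PySem.Dict String (List Int))).contains t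
          then p + 1 else p)
        = (fun (p : Int) t => if decide (t ∈ pvNames) then p + 1 else p) from
      funext fun p => funext fun t => by rw [pvContains_eq]]
    rw [PySem.List.foldl_if_add_one (fun t => decide (t ∈ pvNames)) (pvSplit x) 0]
    simp
  have hB : trova_nomi_alt x
      = (pvNames.map (fun n => ((pvSplit x).count n : Int))).sum := by
    simp only [trova_nomi_alt]
    rw [PySem.Dict.foldl_insert_getD_add_one_eq_counter,
        PySem.List.foldl_add pvNames (fun n => (PySem.Dict.counter (pvSplit x)).getD n 0) 0]
    simp [PySem.Dict.getD_counter]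
  rw [hA, hB, pvMain]
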